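-- pv_equiv track=rewrite | github.com/treygoff24/rlcoach | src/rlcoach/data/benchmarks.py | get_closest_rank_tier
-- ===== SOURCE A (Python) =====
-- def get_closest_rank_tier(mmr: int) -> int:
--     """Estimate rank tier from MMR using approximate 3v3 thresholds."""
--
--     thresholds = [
--         (0, 1),
--         (175, 2),
--         (255, 3),
--         (335, 4),
--         (415, 5),
--         (495, 6),
--         (575, 7),
--         (655, 8),
--         (735, 9),
--         (815, 10),
--         (895, 11),
--         (975, 12),
--         (1055, 13),
--         (1135, 14),
--         (1215, 15),
--         (1295, 16),
--         (1375, 17),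
--         (1455, 18),
--         (1535, 19),
--         (1615, 20),
--         (1695, 21),
--         (1775, 22),
--     ]
--
--     for mmr_threshold, tier in reversed(thresholds):
--         if mmr >= mmr_threshold:
--             return tier
--     return 1
-- ===== SOURCE B (Python) =====
-- def get_closest_rank_tier(mmr: int) -> int:
--     """Estimate rank tier from MMR using approximate 3v3 thresholds."""
--     # Thresholds above the first form an arithmetic progression 175 + 80*k,
--     # so the tier is a closed formula instead of a table scan.
--     if mmr < 175:
--         return 1
--     return min(22, (mmr - 175) // 80 + 2)
-- ===== Notes on version B (the rewrite author's own statement) =====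
-- stated objective: simpler
-- what changed: Replaces the 22-entry reverse table scan with a closed-form arithmetic formula: tiers 2..22 sit on the progression 175+80k, so the tier is min(22, (mmr-175)//80 + 2), with mmr<175 giving 1.
import Mathlib
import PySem

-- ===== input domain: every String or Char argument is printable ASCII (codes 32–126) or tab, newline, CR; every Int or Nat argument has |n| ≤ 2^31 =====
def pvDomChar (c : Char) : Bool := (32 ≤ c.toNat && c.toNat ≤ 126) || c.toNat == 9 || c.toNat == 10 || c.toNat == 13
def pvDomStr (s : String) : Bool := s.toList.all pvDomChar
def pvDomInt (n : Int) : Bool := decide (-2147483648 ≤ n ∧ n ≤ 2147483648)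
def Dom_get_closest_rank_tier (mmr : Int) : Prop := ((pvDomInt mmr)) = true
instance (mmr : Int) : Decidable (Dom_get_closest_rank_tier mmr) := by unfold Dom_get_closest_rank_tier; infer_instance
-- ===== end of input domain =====

-- ===== PORT A =====
-- B replaces A's reverse scan of the threshold table with a closed-form formula (objective: simpler).
-- A's for-loop over reversed(thresholds) with early return, as structural recursion.
def pvLoopA (mmr : Int) : List (Int × Int) → Int
  | [] => 1
  | (t, tier) :: rest => if mmr ≥ t then tier else pvLoopA mmr rest

def pvThresholds : List (Int × Int) :=
  [(0, 1), (175, 2), (255, 3), (335, 4), (415, 5), (495, 6), (575, 7), (655, 8),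
   (735, 9), (815, 10), (895, 11), (975, 12), (1055, 13), (1135, 14), (1215, 15),
   (1295, 16), (1375, 17), (1455, 18), (1535, 19), (1615, 20), (1695, 21), (1775, 22)]

def get_closest_rank_tier (mmr : Int) : Int :=
  pvLoopA mmr pvThresholds.reverse

-- ===== PORT B =====
def get_closest_rank_tier_alt (mmr : Int) : Int :=
  if mmr < 175 then 1
  else min 22 (PySem.Int.floordiv (mmr - 175) 80 + 2)

-- ===== PRECONDITION & SPEC =====
def Spec_get_closest_rank_tier (mmr : Int) (out : Int) : Prop := out = get_closest_rank_tier_alt mmr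
instance (mmr : Int) (out : Int) : Decidable (Spec_get_closest_rank_tier mmr out) := by unfold Spec_get_closest_rank_tier; infer_instance

-- ===== CLAIM (what is proved, stated in full; the proofs are below) =====
def Claim_equal_get_closest_rank_tier : Prop := ∀ (mmr : Int), Dom_get_closest_rank_tier mmr → Spec_get_closest_rank_tier mmr (get_closest_rank_tier mmr)

-- ===== LEMMAS AND PROOFS =====

theorem stp (mmr t tier : Int) (rest : List (Int × Int)) :
    pvLoopA mmr ((t, tier) :: rest) = if mmr ≥ t then tier else pvLoopA mmr rest := rfl

theorem stn (mmr : Int) : pvLoopA mmr [] = 1 := rfl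

set_option maxHeartbeats 1000000 in
theorem loop_closed_form (mmr : Int) :
    pvLoopA mmr pvThresholds.reverse =
      (if mmr < 175 then 1 else min 22 ((mmr - 175) / 80 + 2)) := by
  rw [show pvThresholds.reverse =
    [(1775, 22), (1695, 21), (1615, 20), (1535, 19), (1455, 18), (1375, 17), (1295, 16),
     (1215, 15), (1135, 14), (1055, 13), (975, 12), (895, 11), (815, 10), (735, 9), (655, 8),
     (575, 7), (495, 6), (415, 5), (335, 4), (255, 3), (175, 2), (0, 1)] from rfl]
  by_cases h0 : mmr ≥ 1775
  · rw [stp, if_pos h0, if_neg (show ¬ mmr < 175 by omega), min_def, if_pos (show (22:Int) ≤ (mmr-175)/80+2 by omega)]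
  · rw [stp, if_neg h0]
    by_cases h1 : mmr ≥ 1695
    · rw [stp, if_pos h1, if_neg (show ¬ mmr < 175 by omega), min_def, if_neg (show ¬ (22:Int) ≤ (mmr-175)/80+2 by omega)]
      omega
    · rw [stp, if_neg h1]
      by_cases h2 : mmr ≥ 1615
      · rw [stp, if_pos h2, if_neg (show ¬ mmr < 175 by omega), min_def, if_neg (show ¬ (22:Int) ≤ (mmr-175)/80+2 by omega)]
        omega
      · rw [stp, if_neg h2]
        by_cases h3 : mmr ≥ 1535
        · rw [stp, if_pos h3, if_neg (show ¬ mmr < 175 by omega), min_def, if_neg (show ¬ (22:Int) ≤ (mmr-175)/80+2 by omega)]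
          omega
        · rw [stp, if_neg h3]
          by_cases h4 : mmr ≥ 1455
          · rw [stp, if_pos h4, if_neg (show ¬ mmr < 175 by omega), min_def, if_neg (show ¬ (22:Int) ≤ (mmr-175)/80+2 by omega)]
            omega
          · rw [stp, if_neg h4]
            by_cases h5 : mmr ≥ 1375
            · rw [stp, if_pos h5, if_neg (show ¬ mmr < 175 by omega), min_def, if_neg (show ¬ (22:Int) ≤ (mmr-175)/80+2 by omega)]
              omega
            · rw [stp, if_neg h5]
              by_cases h6 : mmr ≥ 1295
              · rw [stp, if_pos h6, if_neg (show ¬ mmr < 175 by omega), min_def, if_neg (show ¬ (22:Int) ≤ (mmr-175)/80+2 by omega)]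
                omega
              · rw [stp, if_neg h6]
                by_cases h7 : mmr ≥ 1215
                · rw [stp, if_pos h7, if_neg (show ¬ mmr < 175 by omega), min_def, if_neg (show ¬ (22:Int) ≤ (mmr-175)/80+2 by omega)]
                  omega
                · rw [stp, if_neg h7]
                  by_cases h8 : mmr ≥ 1135
                  · rw [stp, if_pos h8, if_neg (show ¬ mmr < 175 by omega), min_def, if_neg (show ¬ (22:Int) ≤ (mmr-175)/80+2 by omega)]
                    omega
                  · rw [stp, if_neg h8]
                    by_cases h9 : mmr ≥ 1055
                    · rw [stp, if_pos h9, if_neg (show ¬ mmr < 175 by omega), min_def, if_neg (show ¬ (22:Int) ≤ (mmr-175)/80+2 by omega)]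
                      omega
                    · rw [stp, if_neg h9]
                      by_cases h10 : mmr ≥ 975
                      · rw [stp, if_pos h10, if_neg (show ¬ mmr < 175 by omega), min_def, if_neg (show ¬ (22:Int) ≤ (mmr-175)/80+2 by omega)]
                        omega
                      · rw [stp, if_neg h10]
                        by_cases h11 : mmr ≥ 895
                        · rw [stp, if_pos h11, if_neg (show ¬ mmr < 175 by omega), min_def, if_neg (show ¬ (22:Int) ≤ (mmr-175)/80+2 by omega)]
                          omega
                        · rw [stp, if_neg h11]
                          by_cases h12 : mmr ≥ 815
                          · rw [stp, if_pos h12, if_neg (show ¬ mmr < 175 by omega), min_def, if_neg (show ¬ (22:Int) ≤ (mmr-175)/80+2 by omega)]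
                            omega
                          · rw [stp, if_neg h12]
                            by_cases h13 : mmr ≥ 735
                            · rw [stp, if_pos h13, if_neg (show ¬ mmr < 175 by omega), min_def, if_neg (show ¬ (22:Int) ≤ (mmr-175)/80+2 by omega)]
                              omega
                            · rw [stp, if_neg h13]
                              by_cases h14 : mmr ≥ 655
                              · rw [stp, if_pos h14, if_neg (show ¬ mmr < 175 by omega), min_def, if_neg (show ¬ (22:Int) ≤ (mmr-175)/80+2 by omega)]
                                omega
                              · rw [stp, if_neg h14]
                                by_cases h15 : mmr ≥ 575
                                · rw [stp, if_pos h15, if_neg (show ¬ mmr < 175 by omega), min_def, if_neg (show ¬ (22:Int) ≤ (mmr-175)/80+2 by omega)]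
                                  omega
                                · rw [stp, if_neg h15]
                                  by_cases h16 : mmr ≥ 495
                                  · rw [stp, if_pos h16, if_neg (show ¬ mmr < 175 by omega), min_def, if_neg (show ¬ (22:Int) ≤ (mmr-175)/80+2 by omega)]
                                    omega
                                  · rw [stp, if_neg h16]
                                    by_cases h17 : mmr ≥ 415
                                    · rw [stp, if_pos h17, if_neg (show ¬ mmr < 175 by omega), min_def, if_neg (show ¬ (22:Int) ≤ (mmr-175)/80+2 by omega)]
                                      omega
                                    · rw [stp, if_neg h17]
                                      by_cases h18 : mmr ≥ 335
                                      · rw [stp, if_pos h18, if_neg (show ¬ mmr < 175 by omega), min_def, if_neg (show ¬ (22:Int) ≤ (mmr-175)/80+2 by omega)]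
                                        omega
                                      · rw [stp, if_neg h18]
                                        by_cases h19 : mmr ≥ 255
                                        · rw [stp, if_pos h19, if_neg (show ¬ mmr < 175 by omega), min_def, if_neg (show ¬ (22:Int) ≤ (mmr-175)/80+2 by omega)]
                                          omega
                                        · rw [stp, if_neg h19]
                                          by_cases h20 : mmr ≥ 175
                                          · rw [stp, if_pos h20, if_neg (show ¬ mmr < 175 by omega), min_def, if_neg (show ¬ (22:Int) ≤ (mmr-175)/80+2 by omega)]
                                            omega
                                          · rw [stp, if_neg h20]
                                            by_cases h21 : mmr ≥ 0
                                            · rw [stp, if_pos h21, if_pos (show mmr < 175 by omega)]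
                                            · rw [stp, if_neg h21]
                                              rw [stn, if_pos (show mmr < 175 by omega)]

-- ===== VERDICT (by name: the statement is the Claim_ definition above) =====
theorem get_closest_rank_tier_spec : Claim_equal_get_closest_rank_tier := by
  intro mmr _
  unfold Spec_get_closest_rank_tier get_closest_rank_tier get_closest_rank_tier_alt
  rw [show PySem.Int.floordiv (mmr - 175) 80 = (mmr - 175) / 80 from
    PySem.Int.floordiv_eq_ediv_of_pos (by omega)]
  exact loop_closed_form mmr
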